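-- pv_equiv track=rewrite | github.com/Harshycn/bch-stratum-inspector | bch_stratum_inspector.py | stratum_prevhash_to_blockchain
-- ===== SOURCE A (Python) =====
-- def stratum_prevhash_to_blockchain(prevhash_hex: str) -> str:
--     """
--     Convert a Stratum-encoded prevhash to blockchain-explorer byte order.
--
--     Stratum transmits the 32-byte hash as eight 4-byte groups, each internally
--     byte-swapped.  We reverse within each group, then reverse the whole hash.
--     """
--     if len(prevhash_hex) != 64:
--         return prevhash_hex
--     # Step 1 — undo per-group byte swap
--     internal = ''.join(
--         ''.join(prevhash_hex[i + j:i + j + 2] for j in range(6, -1, -2))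
--         for i in range(0, 64, 8)
--     )
--     # Step 2 — reverse entire 32 bytes → big-endian display order
--     return ''.join(internal[j:j + 2] for j in range(62, -1, -2))
-- ===== SOURCE B (Python) =====
-- def stratum_prevhash_to_blockchain(prevhash_hex: str) -> str:
--     if len(prevhash_hex) != 64:
--         return prevhash_hex
--     # Reversing bytes in each 4-byte group, then reversing all 32 bytes,
--     # is the same as reversing the order of the eight 8-hex-char groups.
--     return ''.join(prevhash_hex[i:i + 8] for i in range(56, -1, -8))
-- ===== Notes on version B (the rewrite author's own statement) =====
-- stated objective: simpler
-- what changed: B replaces A's two nested passes (per-group byte swap producing an intermediate string, then a whole-hash byte reversal) with a single pass that reverses the order of the eight 8-hex-char groups, since the two reversals compose to exactly that permutation.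
import Mathlib
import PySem

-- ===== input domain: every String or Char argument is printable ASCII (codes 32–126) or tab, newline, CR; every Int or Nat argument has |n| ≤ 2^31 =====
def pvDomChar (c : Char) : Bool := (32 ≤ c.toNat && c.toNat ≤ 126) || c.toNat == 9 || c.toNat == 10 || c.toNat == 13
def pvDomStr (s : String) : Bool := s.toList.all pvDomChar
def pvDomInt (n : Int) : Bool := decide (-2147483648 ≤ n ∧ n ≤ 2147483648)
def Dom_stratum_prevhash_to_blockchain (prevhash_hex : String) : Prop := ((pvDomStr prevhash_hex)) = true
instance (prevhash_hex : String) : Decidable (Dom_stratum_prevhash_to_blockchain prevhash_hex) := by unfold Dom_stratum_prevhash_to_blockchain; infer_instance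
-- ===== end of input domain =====

-- B reverses the order of the eight 8-hex-char groups in one pass, replacing A's two
-- nested passes (per-group byte swap, then whole-hash byte reverse); objective: simpler.

-- ===== PORT A =====
-- if len != 64: passthrough; else internal = ''.join per-group byte swap (i in range(0,64,8),
-- j in range(6,-1,-2)), then ''.join(internal[j:j+2] for j in range(62,-1,-2)).
def stratum_prevhash_to_blockchain (prevhash_hex : String) : String :=
  if PySem.Str.len prevhash_hex ≠ 64 then prevhash_hex
  else
    let internal : List Char :=
      (PySem.List.pyRange 0 64 8).foldl (fun acc i =>
        acc ++ (PySem.List.pyRange 6 (-1) (-2)).foldl (fun acc2 j =>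
          acc2 ++ PySem.List.slice prevhash_hex.toList (some (i + j)) (some (i + j + 2))) []) []
    String.ofList ((PySem.List.pyRange 62 (-1) (-2)).foldl (fun acc j =>
      acc ++ PySem.List.slice internal (some j) (some (j + 2))) [])

-- ===== PORT B =====
-- if len != 64: passthrough; else ''.join(prevhash_hex[i:i+8] for i in range(56,-1,-8)).
def stratum_prevhash_to_blockchain_alt (prevhash_hex : String) : String :=
  if PySem.Str.len prevhash_hex ≠ 64 then prevhash_hex
  else
    String.ofList ((PySem.List.pyRange 56 (-1) (-8)).foldl (fun acc i =>
      acc ++ PySem.List.slice prevhash_hex.toList (some i) (some (i + 8))) [])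

-- ===== PRECONDITION & SPEC =====
def Spec_stratum_prevhash_to_blockchain (prevhash_hex : String) (out : String) : Prop := out = stratum_prevhash_to_blockchain_alt prevhash_hex
instance (prevhash_hex : String) (out : String) : Decidable (Spec_stratum_prevhash_to_blockchain prevhash_hex out) := by unfold Spec_stratum_prevhash_to_blockchain; infer_instance

-- ===== CLAIM (what is proved, stated in full; the proofs are below) =====
def Claim_equal_stratum_prevhash_to_blockchain : Prop := ∀ (prevhash_hex : String), Dom_stratum_prevhash_to_blockchain prevhash_hex → Spec_stratum_prevhash_to_blockchain prevhash_hex (stratum_prevhash_to_blockchain prevhash_hex)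

-- ===== LEMMAS AND PROOFS =====

theorem pv_ofList_append (a b : List Char) :
    String.ofList a ++ String.ofList b = String.ofList (a ++ b) := by
  apply String.toList_inj.mp
  simp

-- A list of length 64 is a 64-tuple of characters.
theorem pv_ex64 (l : List Char) (h : l.length = 64) :
    ∃ c0 c1 c2 c3 c4 c5 c6 c7 c8 c9 c10 c11 c12 c13 c14 c15 c16 c17 c18 c19 c20 c21 c22 c23 c24 c25 c26 c27 c28 c29 c30 c31 c32 c33 c34 c35 c36 c37 c38 c39 c40 c41 c42 c43 c44 c45 c46 c47 c48 c49 c50 c51 c52 c53 c54 c55 c56 c57 c58 c59 c60 c61 c62 c63 : Char, l = [c0,c1,c2,c3,c4,c5,c6,c7,c8,c9,c10,c11,c12,c13,c14,c15,c16,c17,c18,c19,c20,c21,c22,c23,c24,c25,c26,c27,c28,c29,c30,c31,c32,c33,c34,c35,c36,c37,c38,c39,c40,c41,c42,c43,c44,c45,c46,c47,c48,c49,c50,c51,c52,c53,c54,c55,c56,c57,c58,c59,c60,c61,c62,c63] := by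
  rcases l with _|⟨c0, l⟩; · simp at h
  rcases l with _|⟨c1, l⟩; · simp at h
  rcases l with _|⟨c2, l⟩; · simp at h
  rcases l with _|⟨c3, l⟩; · simp at h
  rcases l with _|⟨c4, l⟩; · simp at h
  rcases l with _|⟨c5, l⟩; · simp at h
  rcases l with _|⟨c6, l⟩; · simp at h
  rcases l with _|⟨c7, l⟩; · simp at h
  rcases l with _|⟨c8, l⟩; · simp at h
  rcases l with _|⟨c9, l⟩; · simp at h
  rcases l with _|⟨c10, l⟩; · simp at h
  rcases l with _|⟨c11, l⟩; · simp at h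
  rcases l with _|⟨c12, l⟩; · simp at h
  rcases l with _|⟨c13, l⟩; · simp at h
  rcases l with _|⟨c14, l⟩; · simp at h
  rcases l with _|⟨c15, l⟩; · simp at h
  rcases l with _|⟨c16, l⟩; · simp at h
  rcases l with _|⟨c17, l⟩; · simp at h
  rcases l with _|⟨c18, l⟩; · simp at h
  rcases l with _|⟨c19, l⟩; · simp at h
  rcases l with _|⟨c20, l⟩; · simp at h
  rcases l with _|⟨c21, l⟩; · simp at h
  rcases l with _|⟨c22, l⟩; · simp at h
  rcases l with _|⟨c23, l⟩; · simp at h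
  rcases l with _|⟨c24, l⟩; · simp at h
  rcases l with _|⟨c25, l⟩; · simp at h
  rcases l with _|⟨c26, l⟩; · simp at h
  rcases l with _|⟨c27, l⟩; · simp at h
  rcases l with _|⟨c28, l⟩; · simp at h
  rcases l with _|⟨c29, l⟩; · simp at h
  rcases l with _|⟨c30, l⟩; · simp at h
  rcases l with _|⟨c31, l⟩; · simp at h
  rcases l with _|⟨c32, l⟩; · simp at h
  rcases l with _|⟨c33, l⟩; · simp at h
  rcases l with _|⟨c34, l⟩; · simp at h
  rcases l with _|⟨c35, l⟩; · simp at h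
  rcases l with _|⟨c36, l⟩; · simp at h
  rcases l with _|⟨c37, l⟩; · simp at h
  rcases l with _|⟨c38, l⟩; · simp at h
  rcases l with _|⟨c39, l⟩; · simp at h
  rcases l with _|⟨c40, l⟩; · simp at h
  rcases l with _|⟨c41, l⟩; · simp at h
  rcases l with _|⟨c42, l⟩; · simp at h
  rcases l with _|⟨c43, l⟩; · simp at h
  rcases l with _|⟨c44, l⟩; · simp at h
  rcases l with _|⟨c45, l⟩; · simp at h
  rcases l with _|⟨c46, l⟩; · simp at h
  rcases l with _|⟨c47, l⟩; · simp at h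
  rcases l with _|⟨c48, l⟩; · simp at h
  rcases l with _|⟨c49, l⟩; · simp at h
  rcases l with _|⟨c50, l⟩; · simp at h
  rcases l with _|⟨c51, l⟩; · simp at h
  rcases l with _|⟨c52, l⟩; · simp at h
  rcases l with _|⟨c53, l⟩; · simp at h
  rcases l with _|⟨c54, l⟩; · simp at h
  rcases l with _|⟨c55, l⟩; · simp at h
  rcases l with _|⟨c56, l⟩; · simp at h
  rcases l with _|⟨c57, l⟩; · simp at h
  rcases l with _|⟨c58, l⟩; · simp at h
  rcases l with _|⟨c59, l⟩; · simp at h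
  rcases l with _|⟨c60, l⟩; · simp at h
  rcases l with _|⟨c61, l⟩; · simp at h
  rcases l with _|⟨c62, l⟩; · simp at h
  rcases l with _|⟨c63, l⟩; · simp at h
  rcases l with _|⟨c64, l⟩
  · exact ⟨c0, c1, c2, c3, c4, c5, c6, c7, c8, c9, c10, c11, c12, c13, c14, c15, c16, c17, c18, c19, c20, c21, c22, c23, c24, c25, c26, c27, c28, c29, c30, c31, c32, c33, c34, c35, c36, c37, c38, c39, c40, c41, c42, c43, c44, c45, c46, c47, c48, c49, c50, c51, c52, c53, c54, c55, c56, c57, c58, c59, c60, c61, c62, c63, rfl⟩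
  · simp at h

-- Step 1 of A on an explicit 64-character list: the per-group byte swap, evaluated.
set_option maxHeartbeats 4000000 in
theorem pv_internal (c0 c1 c2 c3 c4 c5 c6 c7 c8 c9 c10 c11 c12 c13 c14 c15 c16 c17 c18 c19 c20 c21 c22 c23 c24 c25 c26 c27 c28 c29 c30 c31 c32 c33 c34 c35 c36 c37 c38 c39 c40 c41 c42 c43 c44 c45 c46 c47 c48 c49 c50 c51 c52 c53 c54 c55 c56 c57 c58 c59 c60 c61 c62 c63 : Char) :
    (PySem.List.pyRange 0 64 8).foldl (fun acc i =>
      acc ++ (PySem.List.pyRange 6 (-1) (-2)).foldl (fun acc2 j =>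
        acc2 ++ PySem.List.slice [c0,c1,c2,c3,c4,c5,c6,c7,c8,c9,c10,c11,c12,c13,c14,c15,c16,c17,c18,c19,c20,c21,c22,c23,c24,c25,c26,c27,c28,c29,c30,c31,c32,c33,c34,c35,c36,c37,c38,c39,c40,c41,c42,c43,c44,c45,c46,c47,c48,c49,c50,c51,c52,c53,c54,c55,c56,c57,c58,c59,c60,c61,c62,c63] (some (i + j)) (some (i + j + 2))) []) []
    = [c6,c7,c4,c5,c2,c3,c0,c1,c14,c15,c12,c13,c10,c11,c8,c9,c22,c23,c20,c21,c18,c19,c16,c17,c30,c31,c28,c29,c26,c27,c24,c25,c38,c39,c36,c37,c34,c35,c32,c33,c46,c47,c44,c45,c42,c43,c40,c41,c54,c55,c52,c53,c50,c51,c48,c49,c62,c63,c60,c61,c58,c59,c56,c57] := by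
  have h1 : PySem.List.pyRange 0 64 8 = [0,8,16,24,32,40,48,56] := by decide
  have h2 : PySem.List.pyRange 6 (-1) (-2) = [6,4,2,0] := by decide
  rw [h1, h2]
  simp only [List.foldl]
  norm_num [PySem.List.slice, PySem.List.clampIdx]
  simp

-- On an explicit 64-character list both permutations evaluate to the same list.
set_option maxHeartbeats 4000000 in
theorem pv_key (c0 c1 c2 c3 c4 c5 c6 c7 c8 c9 c10 c11 c12 c13 c14 c15 c16 c17 c18 c19 c20 c21 c22 c23 c24 c25 c26 c27 c28 c29 c30 c31 c32 c33 c34 c35 c36 c37 c38 c39 c40 c41 c42 c43 c44 c45 c46 c47 c48 c49 c50 c51 c52 c53 c54 c55 c56 c57 c58 c59 c60 c61 c62 c63 : Char) :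
    String.ofList ((PySem.List.pyRange 62 (-1) (-2)).foldl (fun acc j =>
      acc ++ PySem.List.slice
        ((PySem.List.pyRange 0 64 8).foldl (fun acc i =>
          acc ++ (PySem.List.pyRange 6 (-1) (-2)).foldl (fun acc2 j =>
            acc2 ++ PySem.List.slice [c0,c1,c2,c3,c4,c5,c6,c7,c8,c9,c10,c11,c12,c13,c14,c15,c16,c17,c18,c19,c20,c21,c22,c23,c24,c25,c26,c27,c28,c29,c30,c31,c32,c33,c34,c35,c36,c37,c38,c39,c40,c41,c42,c43,c44,c45,c46,c47,c48,c49,c50,c51,c52,c53,c54,c55,c56,c57,c58,c59,c60,c61,c62,c63] (some (i + j)) (some (i + j + 2))) []) [])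
        (some j) (some (j + 2))) [])
    = String.ofList ((PySem.List.pyRange 56 (-1) (-8)).foldl (fun acc i =>
        acc ++ PySem.List.slice [c0,c1,c2,c3,c4,c5,c6,c7,c8,c9,c10,c11,c12,c13,c14,c15,c16,c17,c18,c19,c20,c21,c22,c23,c24,c25,c26,c27,c28,c29,c30,c31,c32,c33,c34,c35,c36,c37,c38,c39,c40,c41,c42,c43,c44,c45,c46,c47,c48,c49,c50,c51,c52,c53,c54,c55,c56,c57,c58,c59,c60,c61,c62,c63] (some i) (some (i + 8))) []) := by
  rw [pv_internal]
  have h3 : PySem.List.pyRange 62 (-1) (-2) =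
      [62,60,58,56,54,52,50,48,46,44,42,40,38,36,34,32,30,28,26,24,22,20,18,16,14,12,10,8,6,4,2,0] := by decide
  have h4 : PySem.List.pyRange 56 (-1) (-8) = [56,48,40,32,24,16,8,0] := by decide
  rw [h3, h4]
  simp only [List.foldl]
  norm_num [PySem.List.slice, PySem.List.clampIdx]
  simp [pv_ofList_append]

theorem stratum_prevhash_to_blockchain_spec : Claim_equal_stratum_prevhash_to_blockchain := by
  intro s _
  show stratum_prevhash_to_blockchain s = stratum_prevhash_to_blockchain_alt s
  unfold stratum_prevhash_to_blockchain stratum_prevhash_to_blockchain_alt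
  by_cases h : PySem.Str.len s = 64
  · rw [if_neg (not_not_intro h), if_neg (not_not_intro h)]
    have hl : s.toList.length = 64 := by
      have := PySem.Str.len_eq s; omega
    obtain ⟨c0, c1, c2, c3, c4, c5, c6, c7, c8, c9, c10, c11, c12, c13, c14, c15, c16, c17, c18, c19, c20, c21, c22, c23, c24, c25, c26, c27, c28, c29, c30, c31, c32, c33, c34, c35, c36, c37, c38, c39, c40, c41, c42, c43, c44, c45, c46, c47, c48, c49, c50, c51, c52, c53, c54, c55, c56, c57, c58, c59, c60, c61, c62, c63, hle⟩ := pv_ex64 s.toList hl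
    rw [hle]
    exact pv_key c0 c1 c2 c3 c4 c5 c6 c7 c8 c9 c10 c11 c12 c13 c14 c15 c16 c17 c18 c19 c20 c21 c22 c23 c24 c25 c26 c27 c28 c29 c30 c31 c32 c33 c34 c35 c36 c37 c38 c39 c40 c41 c42 c43 c44 c45 c46 c47 c48 c49 c50 c51 c52 c53 c54 c55 c56 c57 c58 c59 c60 c61 c62 c63
  · rw [if_pos h, if_pos h]
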